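-- pv_equiv track=rewrite | github.com/jojo23333/STPAN | utils/image.py | get_split_indexes
-- ===== SOURCE A (Python) =====
-- def get_split_indexes(H, W, p_size):
--     indexs = []
--     h1 = 0
--     while h1 < H:
--         h = H - p_size if h1 + p_size > H else h1
--         w1 = 0
--         while w1 < W:
--             w = W - p_size if w1 + p_size > W else w1
--             indexs.append((h, w))
--             w1 = w1 + p_size - 5
--         h1 = h1 + p_size -5
--     return indexs
-- ===== SOURCE B (Python) =====
-- def get_split_indexes(H, W, p_size):
--     # Closed form: no while loops, no clamping conditionals. The stride is
--     # step = p_size - 5; the number of positions along an axis of length L is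
--     # ceil(L / step), and the k-th position is min(k*step, L - p_size).
--     # One flat loop over all nH*nW patches, decoding (row, col) by divmod.
--     if H <= 0 or W <= 0:
--         return []
--     step = p_size - 5
--     nH = (H + step - 1) // step
--     nW = (W + step - 1) // step
--     out = []
--     for i in range(nH * nW):
--         out.append((min((i // nW) * step, H - p_size),
--                     min((i % nW) * step, W - p_size)))
--     return out
-- ===== Notes on version B (the rewrite author's own statement) =====
-- stated objective: alternative
-- what changed: Replaces A's nested while loops with conditional clamping by a closed form: patch counts per axis computed by ceiling division, then one flat loop over range(nH*nW) decoding row/column by divmod and clamping arithmetically with min.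
import Mathlib
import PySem

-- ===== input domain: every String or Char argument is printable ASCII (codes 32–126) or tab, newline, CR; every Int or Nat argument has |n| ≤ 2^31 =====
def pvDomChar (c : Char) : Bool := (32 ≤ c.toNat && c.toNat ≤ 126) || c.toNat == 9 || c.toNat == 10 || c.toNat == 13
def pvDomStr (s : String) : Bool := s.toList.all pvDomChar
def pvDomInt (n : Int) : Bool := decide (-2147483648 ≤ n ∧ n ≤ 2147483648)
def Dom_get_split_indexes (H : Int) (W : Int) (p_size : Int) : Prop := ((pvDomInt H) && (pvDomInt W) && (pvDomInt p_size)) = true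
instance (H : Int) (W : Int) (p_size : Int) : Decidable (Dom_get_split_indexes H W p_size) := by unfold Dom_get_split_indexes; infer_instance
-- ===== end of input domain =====

-- B replaces A's nested while loops (with conditional clamping) by a closed form:
-- per-axis patch counts by ceiling division, one flat loop over range(nH*nW) decoding
-- (row, col) by // and %, clamping with min; objective: alternative (same cost).
-- Python A diverges when H > 0 and p_size ≤ 5 (step p_size-5 ≤ 0): Pre_ excludes
-- exactly those inputs (A never returns there); A's port carries a fuel/step guard only there.

-- ===== PORT A =====
-- inner `while w1 < W` loop of A, for a fixed row coordinate h (fuel = totality guard)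
def pvInnerGo (W : Int) (p_size : Int) (h : Int) : Nat → Int → List (Int × Int)
  | 0, _ => []
  | n + 1, w1 =>
    if w1 < W then
      if p_size - 5 ≤ 0 then []  -- totality guard: Python diverges here (outside Pre_)
      else
        (h, if w1 + p_size > W then W - p_size else w1) ::
          pvInnerGo W p_size h n (w1 + p_size - 5)
    else []

-- outer `while h1 < H` loop of A (fuel = totality guard)
def pvOuterGo (H : Int) (W : Int) (p_size : Int) : Nat → Int → List (Int × Int)
  | 0, _ => []
  | n + 1, h1 =>
    if h1 < H then
      if p_size - 5 ≤ 0 then []  -- totality guard: Python diverges here (outside Pre_)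
      else
        pvInnerGo W p_size (if h1 + p_size > H then H - p_size else h1) W.toNat 0 ++
          pvOuterGo H W p_size n (h1 + p_size - 5)
    else []

def get_split_indexes (H : Int) (W : Int) (p_size : Int) : List (Int × Int) :=
  pvOuterGo H W p_size H.toNat 0

-- ===== PORT B =====
def get_split_indexes_alt (H : Int) (W : Int) (p_size : Int) : List (Int × Int) :=
  if H ≤ 0 ∨ W ≤ 0 then []
  else
    let step := p_size - 5
    let nH := PySem.Int.floordiv (H + step - 1) step
    let nW := PySem.Int.floordiv (W + step - 1) step
    (PySem.List.pyRange 0 (nH * nW) 1).foldl (fun out i =>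
      out ++ [(min ((PySem.Int.floordiv i nW) * step) (H - p_size),
               min ((PySem.Int.mod i nW) * step) (W - p_size))]) []

-- ===== PRECONDITION & SPEC =====
-- Pre_ excludes exactly the inputs where Python A loops forever (H > 0 with step p_size-5 ≤ 0).
def Pre_get_split_indexes (H : Int) (W : Int) (p_size : Int) : Prop := 5 < p_size ∨ H ≤ 0
instance (H : Int) (W : Int) (p_size : Int) : Decidable (Pre_get_split_indexes H W p_size) := by unfold Pre_get_split_indexes; infer_instance
def pvWitness_get_split_indexes : Int × Int × Int := (20, 20, 10)

def Spec_get_split_indexes (H : Int) (W : Int) (p_size : Int) (out : List (Int × Int)) : Prop := out = get_split_indexes_alt H W p_size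
instance (H : Int) (W : Int) (p_size : Int) (out : List (Int × Int)) : Decidable (Spec_get_split_indexes H W p_size out) := by unfold Spec_get_split_indexes; infer_instance

-- ===== CLAIM (what is proved, stated in full; the proofs are below) =====
def Claim_equal_get_split_indexes : Prop := ∀ (H : Int) (W : Int) (p_size : Int), Dom_get_split_indexes H W p_size → Pre_get_split_indexes H W p_size → Spec_get_split_indexes H W p_size (get_split_indexes H W p_size)

-- ===== LEMMAS AND PROOFS =====

-- ceiling count of positions along an axis of length L with stride s, as a Nat
def pvCnt (L s : Int) : Nat := ((L + s - 1) / s).toNat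

-- membership criterion: the k-th start position k*s lies in the axis iff k < pvCnt L s
lemma pvCnt_iff (L s : Int) (hs : 0 < s) (k : Nat) : ((k : Int) * s < L) ↔ k < pvCnt L s := by
  unfold pvCnt
  set c : Int := (L + s - 1) / s with hc
  have h1 : c * s ≤ L + s - 1 := Int.ediv_mul_le _ (by omega)
  have h2 : L + s - 1 < (c + 1) * s := Int.lt_ediv_add_one_mul_self _ hs
  constructor
  · intro h
    have hcpos : 0 < c := by nlinarith
    have : (k : Int) < c := by nlinarith
    omega
  · intro h
    have hkc : (k : Int) < c := by omega
    have : ((k : Int) + 1) * s ≤ c * s := by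
      have : (k : Int) + 1 ≤ c := by omega
      exact mul_le_mul_of_nonneg_right this (le_of_lt hs)
    nlinarith

lemma pvCnt_le_toNat (L s : Int) (hs : 0 < s) : pvCnt L s ≤ L.toNat := by
  unfold pvCnt
  set c : Int := (L + s - 1) / s with hc
  have h1 : c * s ≤ L + s - 1 := Int.ediv_mul_le _ (by omega)
  have : c ≤ max L 0 := by nlinarith [le_max_left L 0, le_max_right L 0]
  omega

-- A's clamp conditional is the arithmetic min (for nonnegative start positions)
lemma pvClamp_eq_min (x L p : Int) (_hx : 0 ≤ x) :
    (if x + p > L then L - p else x) = min x (L - p) := by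
  split_ifs with h <;> omega

-- A's inner loop is the mapped range of clamped positions
lemma pvInnerGo_eq (W p h : Int) (hp : 5 < p) :
    ∀ (n : Nat) (k : Nat), pvCnt W (p - 5) ≤ k + n →
      pvInnerGo W p h n ((k : Int) * (p - 5)) =
        (List.range (pvCnt W (p - 5) - k)).map
          (fun j => (h, min (((k + j : Nat) : Int) * (p - 5)) (W - p))) := by
  intro n
  induction n with
  | zero =>
      intro k hk
      have : pvCnt W (p - 5) - k = 0 := by omega
      simp [pvInnerGo, this]
  | succ n ih =>
      intro k hk
      by_cases hlt : (k : Int) * (p - 5) < W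
      · have hkc : k < pvCnt W (p - 5) := (pvCnt_iff W (p - 5) (by omega) k).1 hlt
        have hstep : ¬ (p - 5 ≤ 0) := by omega
        have hnext : (k : Int) * (p - 5) + p - 5 = ((k + 1 : Nat) : Int) * (p - 5) := by
          push_cast; ring
        have hsub : pvCnt W (p - 5) - k = (pvCnt W (p - 5) - (k + 1)) + 1 := by omega
        rw [pvInnerGo, if_pos hlt, if_neg hstep, hnext, ih (k + 1) (by omega), hsub,
          List.range_succ_eq_map]
        simp only [List.map_cons, List.map_map]
        congr 1
        · rw [pvClamp_eq_min _ _ _ (mul_nonneg (Int.natCast_nonneg k) (by omega))]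
          simp
        · apply List.map_congr_left
          intro j _
          simp [Function.comp, Nat.add_comm, Nat.add_left_comm]
      · have hkc : ¬ k < pvCnt W (p - 5) := fun h' => hlt ((pvCnt_iff W (p - 5) (by omega) k).2 h')
        have : pvCnt W (p - 5) - k = 0 := by omega
        rw [pvInnerGo, if_neg hlt, this]
        simp

-- A's outer loop is the flatMap of rows over the row range
lemma pvOuterGo_eq (H W p : Int) (hp : 5 < p) :
    ∀ (n : Nat) (k : Nat), pvCnt H (p - 5) ≤ k + n →
      pvOuterGo H W p n ((k : Int) * (p - 5)) =
        (List.range (pvCnt H (p - 5) - k)).flatMap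
          (fun (j : Nat) => (List.range (pvCnt W (p - 5))).map
            (fun (i : Nat) => (min (((k + j : Nat) : Int) * (p - 5)) (H - p),
                       min ((i : Int) * (p - 5)) (W - p)))) := by
  intro n
  induction n with
  | zero =>
      intro k hk
      have : pvCnt H (p - 5) - k = 0 := by omega
      simp [pvOuterGo, this]
  | succ n ih =>
      intro k hk
      by_cases hlt : (k : Int) * (p - 5) < H
      · have hkc : k < pvCnt H (p - 5) := (pvCnt_iff H (p - 5) (by omega) k).1 hlt
        have hstep : ¬ (p - 5 ≤ 0) := by omega
        have hnext : (k : Int) * (p - 5) + p - 5 = ((k + 1 : Nat) : Int) * (p - 5) := by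
          push_cast; ring
        have hsub : pvCnt H (p - 5) - k = (pvCnt H (p - 5) - (k + 1)) + 1 := by omega
        have hinner := pvInnerGo_eq W p
          (if (k : Int) * (p - 5) + p > H then H - p else (k : Int) * (p - 5)) hp
          W.toNat 0 (by simpa using pvCnt_le_toNat W (p - 5) (by omega))
        rw [pvOuterGo, if_pos hlt, if_neg hstep, hnext, ih (k + 1) (by omega)]
        rw [show ((0 : Nat) : Int) * (p - 5) = 0 by ring] at hinner
        rw [hinner, hsub, List.range_succ_eq_map]
        simp only [List.flatMap_cons]
        congr 1
        · rw [pvClamp_eq_min _ _ _ (mul_nonneg (Int.natCast_nonneg k) (by omega))]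
          apply List.map_congr_left
          intro i _
          simp
        · rw [List.flatMap_map]
          apply List.flatMap_congr
          intro j _
          simp [Nat.add_comm, Nat.add_left_comm]
      · have hkc : ¬ k < pvCnt H (p - 5) := fun h' => hlt ((pvCnt_iff H (p - 5) (by omega) k).2 h')
        have : pvCnt H (p - 5) - k = 0 := by omega
        rw [pvOuterGo, if_neg hlt, this]
        simp

-- flat range with divmod decoding = nested ranges (Nat version)
lemma pvFlat_eq_nested {α : Type} (g : Nat → Nat → α) (b : Nat) (hb : 0 < b) :
    ∀ a : Nat, (List.range (a * b)).map (fun i => g (i / b) (i % b)) =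
      (List.range a).flatMap (fun kh => (List.range b).map (fun kw => g kh kw)) := by
  intro a
  induction a with
  | zero => simp
  | succ a ih =>
      rw [Nat.succ_mul, List.range_add, List.map_append, ih, List.range_succ,
        List.flatMap_append]
      congr 1
      simp only [List.flatMap_cons, List.flatMap_nil, List.append_nil, List.map_map]
      apply List.map_congr_left
      intro j hj
      have hjb : j < b := List.mem_range.mp hj
      simp only [Function.comp]
      congr 1
      · rw [Nat.mul_comm a b, Nat.mul_add_div hb, Nat.div_eq_of_lt hjb]
        omega
      · rw [Nat.mul_comm a b, Nat.mul_add_mod, Nat.mod_eq_of_lt hjb]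

-- B's foldl-append accumulation is a map
lemma pvFoldl_append_map {α β : Type} (f : α → β) (xs : List α) (acc : List β) :
    xs.foldl (fun out i => out ++ [f i]) acc = acc ++ xs.map f := by
  induction xs generalizing acc with
  | nil => simp
  | cons x xs ih => simp [List.foldl_cons, ih]

-- ===== VERDICT (by name: the statement is the Claim_ definition above) =====
theorem get_split_indexes_spec : Claim_equal_get_split_indexes := by
  intro H W p _ hpre
  unfold Spec_get_split_indexes get_split_indexes get_split_indexes_alt
  by_cases hH : H ≤ 0
  · have : H.toNat = 0 := by omega
    rw [this]
    simp [pvOuterGo, hH]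
  · -- H > 0, so Pre_ gives 5 < p
    have hp : 5 < p := by
      rcases hpre with h | h
      · exact h
      · omega
    have hs : (0 : Int) < p - 5 := by omega
    have hA := pvOuterGo_eq H W p hp H.toNat 0 (by simpa using pvCnt_le_toNat H (p - 5) hs)
    rw [show ((0 : Nat) : Int) * (p - 5) = 0 by ring] at hA
    simp only [Nat.sub_zero, Nat.zero_add] at hA
    rw [hA]
    by_cases hW : W ≤ 0
    · -- each row is empty: pvCnt W = 0
      have hcW : pvCnt W (p - 5) = 0 := by
        by_contra h
        have h1 : 0 < pvCnt W (p - 5) := Nat.pos_of_ne_zero h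
        have := (pvCnt_iff W (p - 5) hs 0).2 h1
        simp at this
        omega
      rw [if_pos (Or.inr hW), hcW]
      simp
    · rw [if_neg (by omega)]
      -- counts in port B equal pvCnt
      have hfdH : PySem.Int.floordiv (H + (p - 5) - 1) (p - 5) = (H + (p - 5) - 1) / (p - 5) :=
        PySem.Int.floordiv_eq_ediv_of_pos hs
      have hfdW : PySem.Int.floordiv (W + (p - 5) - 1) (p - 5) = (W + (p - 5) - 1) / (p - 5) :=
        PySem.Int.floordiv_eq_ediv_of_pos hs
      have hcHnn : 0 ≤ (H + (p - 5) - 1) / (p - 5) := Int.ediv_nonneg (by omega) (by omega)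
      have hcWnn : 0 ≤ (W + (p - 5) - 1) / (p - 5) := Int.ediv_nonneg (by omega) (by omega)
      have hcH : (H + (p - 5) - 1) / (p - 5) = (pvCnt H (p - 5) : Int) := by
        unfold pvCnt; omega
      have hcW : (W + (p - 5) - 1) / (p - 5) = (pvCnt W (p - 5) : Int) := by
        unfold pvCnt; omega
      have hcWpos : 0 < pvCnt W (p - 5) :=
        (pvCnt_iff W (p - 5) hs 0).1 (by simpa using (by omega : (0:Int) < W))
      simp only [hfdH, hfdW, hcH, hcW]
      rw [pvFoldl_append_map, List.nil_append]
      rw [show ((pvCnt H (p - 5) : Int) * (pvCnt W (p - 5) : Int)) =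
            ((pvCnt H (p - 5) * pvCnt W (p - 5) : Nat) : Int) by push_cast; ring]
      rw [PySem.List.pyRange_zero_natCast]
      rw [List.map_map]
      have hmap : ((fun i : Int =>
            (min (PySem.Int.floordiv i ((pvCnt W (p - 5) : Nat) : Int) * (p - 5)) (H - p),
             min (PySem.Int.mod i ((pvCnt W (p - 5) : Nat) : Int) * (p - 5)) (W - p))) ∘
              (fun k : Nat => (k : Int)))
          = fun i : Nat =>
              (fun kh kw : Nat =>
                (min ((kh : Int) * (p - 5)) (H - p), min ((kw : Int) * (p - 5)) (W - p)))
                (i / pvCnt W (p - 5)) (i % pvCnt W (p - 5)) := by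
        funext i
        simp [Function.comp, PySem.Int.floordiv_natCast, PySem.Int.mod_natCast]
      rw [hmap]
      exact (pvFlat_eq_nested
        (fun kh kw => (min ((kh : Int) * (p - 5)) (H - p), min ((kw : Int) * (p - 5)) (W - p)))
        _ hcWpos _).symm
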